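-- pv_equiv track=rewrite | github.com/Catonpancake/sdphysiology | ml_utils.py | count_lstm_params
-- ===== SOURCE A (Python) =====
-- def count_lstm_params(input_size: int, hidden_size: int, num_layers: int) -> int:
--     """
--     Pytorch LSTM with bias: per layer params = 4*H*(I_or_H + H + 2)
--     (because i2h: 4H*(in), h2h: 4H*H, bias_ih:4H, bias_hh:4H)
--     First layer in_dim=I, subsequent layers in_dim=H.
--     """
--     total = 0
--     for layer in range(num_layers):
--         in_dim = input_size if layer == 0 else hidden_size
--         total += 4 * hidden_size * in_dim   # weight_ih
--         total += 4 * hidden_size * hidden_size  # weight_hh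
--         total += 8 * hidden_size  # two biases
--     return total
-- ===== SOURCE B (Python) =====
-- def count_lstm_params(input_size: int, hidden_size: int, num_layers: int) -> int:
--     """Closed-form: first layer 4H(I+H+2), each deeper layer 4H(2H+2)."""
--     if num_layers <= 0:
--         return 0
--     first = 4 * hidden_size * (input_size + hidden_size + 2)
--     deeper = 4 * hidden_size * (2 * hidden_size + 2)
--     return first + (num_layers - 1) * deeper
-- ===== Notes on version B (the rewrite author's own statement) =====
-- stated objective: faster
-- what changed: Replaced the per-layer loop with a closed-form expression: first-layer term plus (num_layers-1) times the identical per-deep-layer term.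
import Mathlib
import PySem

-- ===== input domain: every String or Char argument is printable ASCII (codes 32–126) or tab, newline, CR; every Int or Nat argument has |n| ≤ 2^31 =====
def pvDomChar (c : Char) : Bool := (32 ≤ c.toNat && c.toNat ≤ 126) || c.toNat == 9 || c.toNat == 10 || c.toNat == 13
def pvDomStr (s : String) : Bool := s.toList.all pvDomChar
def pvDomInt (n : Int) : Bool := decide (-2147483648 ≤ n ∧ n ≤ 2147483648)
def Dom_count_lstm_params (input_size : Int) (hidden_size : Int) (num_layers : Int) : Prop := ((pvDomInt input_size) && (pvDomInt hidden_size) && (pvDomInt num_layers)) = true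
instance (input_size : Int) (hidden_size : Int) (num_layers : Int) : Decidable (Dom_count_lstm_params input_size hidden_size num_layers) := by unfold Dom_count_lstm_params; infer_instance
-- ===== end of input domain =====

-- B replaces A's per-layer loop with a closed-form expression (first layer + (n-1) identical deeper layers).

-- ===== PORT A =====
def count_lstm_params (input_size : Int) (hidden_size : Int) (num_layers : Int) : Int :=
  (PySem.List.pyRange 0 num_layers 1).foldl
    (fun total layer =>
      let in_dim := if layer == 0 then input_size else hidden_size
      total + 4 * hidden_size * in_dim + 4 * hidden_size * hidden_size + 8 * hidden_size)
    0

-- ===== PORT B =====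
def count_lstm_params_alt (input_size : Int) (hidden_size : Int) (num_layers : Int) : Int :=
  if num_layers ≤ 0 then 0
  else
    let first := 4 * hidden_size * (input_size + hidden_size + 2)
    let deeper := 4 * hidden_size * (2 * hidden_size + 2)
    first + (num_layers - 1) * deeper

-- ===== PRECONDITION & SPEC =====
def Spec_count_lstm_params (input_size : Int) (hidden_size : Int) (num_layers : Int) (out : Int) : Prop :=
  out = count_lstm_params_alt input_size hidden_size num_layers
instance (input_size : Int) (hidden_size : Int) (num_layers : Int) (out : Int) : Decidable (Spec_count_lstm_params input_size hidden_size num_layers out) := by unfold Spec_count_lstm_params; infer_instance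

-- ===== CLAIM =====
def Claim_equal_count_lstm_params : Prop := ∀ (input_size : Int) (hidden_size : Int) (num_layers : Int), Dom_count_lstm_params input_size hidden_size num_layers → Spec_count_lstm_params input_size hidden_size num_layers (count_lstm_params input_size hidden_size num_layers)

-- ===== LEMMAS AND PROOFS =====
lemma count_fold_closed (i h : Int) (m : Nat) :
    (PySem.List.pyRange 0 (m : Int) 1).foldl
      (fun total layer =>
        let in_dim := if layer == 0 then i else h
        total + 4 * h * in_dim + 4 * h * h + 8 * h) 0
    = if m = 0 then 0
      else 4 * h * (i + h + 2) + ((m : Int) - 1) * (4 * h * (2 * h + 2)) := by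
  induction m with
  | zero => simp [PySem.List.pyRange_one_eq_nil]
  | succ k ih =>
    have hcast : ((k + 1 : Nat) : Int) = (k : Int) + 1 := by push_cast; ring
    rw [hcast, PySem.List.pyRange_one_succ_right (by exact_mod_cast Nat.zero_le k),
        List.foldl_append, ih]
    cases k with
    | zero => simp; ring
    | succ j =>
      have h1 : ((j + 1 : Nat) : Int) ≠ 0 := by positivity
      simp
      split_ifs with hc
      · exact absurd hc (by positivity)
      · ring

theorem count_lstm_params_spec : Claim_equal_count_lstm_params := by
  intro i h n _
  unfold Spec_count_lstm_params count_lstm_params count_lstm_params_alt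
  by_cases hn : n ≤ 0
  · simp [PySem.List.pyRange_one_eq_nil hn, hn]
  · have h0 : 0 < n := lt_of_not_ge hn
    have hcast : n = ((n.toNat : Nat) : Int) := (Int.toNat_of_nonneg h0.le).symm
    rw [hcast, count_fold_closed]
    have : n.toNat ≠ 0 := by omega
    simp [this, hn]
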